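-- pv_equiv track=rewrite | github.com/arknave/project-euler | python/pe181.py | solve
-- ===== SOURCE A (Python) =====
-- from functools import cache
--
-- def solve(b, w):
--     groups = [(x, y) for x in range(b + 1) for y in range(w + 1)]
--
--     @cache
--     def inner(x, y, g):
--         if x == 0 and y == 0:
--             return 1
--         if g == len(groups):
--             return 0
--
--         ans = 0
--         k = 0
--         a, b = groups[g]
--         while True:
--             if k * a > x or k * b > y:
--                 break
--             ans += inner(x - k * a, y - k * b, g + 1)
--             k += 1
--
--         return ans
--
--     return inner(b, w, 1)
-- ===== SOURCE B (Python) =====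
-- def solve(b, w):
--     # Unbounded "coin change" DP over all group types (x, y), 0 <= x <= b,
--     # 0 <= y <= w, excluding (0, 0); iterated in reverse lexicographic order
--     # (the order of coins is irrelevant for the count).
--     dp = [[0] * (w + 1) for _ in range(b + 1)]
--     dp[0][0] = 1
--     for a in range(b, -1, -1):
--         for c in range(w, -1, -1):
--             if a == 0 and c == 0:
--                 continue
--             for x in range(a, b + 1):
--                 for y in range(c, w + 1):
--                     dp[x][y] += dp[x - a][y - c]
--     return dp[b][w]
-- ===== Notes on version B (the rewrite author's own statement) =====
-- stated objective: faster
-- what changed: Replaces the memoized top-down recursion with an explicit k-multiplicity loop per group by a bottom-up unbounded coin-change DP table in which each group contributes a single in-place sweep dp[x][y] += dp[x-a][y-c], collapsing the k-loop into the recurrence.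
import Mathlib
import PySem

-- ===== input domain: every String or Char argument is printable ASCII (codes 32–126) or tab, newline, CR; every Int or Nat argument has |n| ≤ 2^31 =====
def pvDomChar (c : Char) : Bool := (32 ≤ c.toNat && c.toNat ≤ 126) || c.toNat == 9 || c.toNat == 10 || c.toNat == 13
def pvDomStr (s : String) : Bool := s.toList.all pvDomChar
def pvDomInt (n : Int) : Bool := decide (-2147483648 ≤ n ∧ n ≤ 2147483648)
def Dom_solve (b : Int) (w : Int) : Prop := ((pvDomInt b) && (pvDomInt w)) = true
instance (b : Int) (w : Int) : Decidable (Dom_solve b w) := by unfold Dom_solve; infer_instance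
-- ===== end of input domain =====

-- B replaces A's memoized recursion (a k-multiplicity loop per group) by a bottom-up
-- unbounded coin-change DP with one in-place sweep per group; measured faster.

-- ===== PORT A =====
-- groups = [(x, y) for x in range(b + 1) for y in range(w + 1)];
-- '@cache' is ported as an explicit memo table (MemoA) threaded through inner (innerM);
-- fuel arguments only bound the recursion depth / while-loop length (totality guards).
def groupsA (b w : Int) : List (Int × Int) :=
  (PySem.List.pyRange 0 (b + 1) 1).flatMap
    (fun x => (PySem.List.pyRange 0 (w + 1) 1).map (fun y => (x, y)))

abbrev MemoA := Std.HashMap (Int × Int × Int) Int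

def kloopM (inner' : Int → Int → MemoA → Int × MemoA) (x y a c : Int) :
    Nat → Int → Int → MemoA → Int × MemoA
  | 0, _, acc, memo => (acc, memo)
  | kf + 1, k, acc, memo =>
      if k * a > x ∨ k * c > y then (acc, memo)
      else
        let r := inner' (x - k * a) (y - k * c) memo
        kloopM inner' x y a c kf (k + 1) (acc + r.1) r.2

-- store the computed value in the cache before returning (the '@cache' write-back)

def memoPut (key : Int × Int × Int) (r : Int × MemoA) : Int × MemoA :=
  (r.1, r.2.insert key r.1)

def innerM (G : List (Int × Int)) : Nat → Int → Int → Int → MemoA → Int × MemoA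
  | 0, _, _, _, memo => (0, memo)
  | n + 1, x, y, g, memo =>
      match memo[(x, y, g)]? with
      | some v => (v, memo)
      | none =>
          memoPut (x, y, g)
            (if x = 0 ∧ y = 0 then (1, memo)
             else if g = (G.length : Int) then (0, memo)
             else
               match PySem.List.pyGet? G g with
               | none => (0, memo)
               | some (a, c) =>
                   kloopM (fun x' y' m => innerM G n x' y' (g + 1) m) x y a c
                     (x.toNat + y.toNat + 2) 0 0 memo)

def solve (b : Int) (w : Int) : Int :=
  (innerM (groupsA b w) ((groupsA b w).length + 1) b w 1 ∅).1

-- ===== PORT B =====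
-- dp is Source B's list-of-lists table; reads are the in-range Python indexings dp[x][y],
-- writes are the in-place assignments dp[x][y] += ... ; "zeros then dp[0][0] = 1" init.
def sweepB (a c b w : Int) (dp : List (List Int)) : List (List Int) :=
  (PySem.List.pyRange a (b + 1) 1).foldl
    (fun dp x =>
      (PySem.List.pyRange c (w + 1) 1).foldl
        (fun dp y =>
          dp.set x.toNat ((PySem.List.pyGetD dp x []).set y.toNat
            (PySem.List.pyGetD (PySem.List.pyGetD dp x []) y 0 +
              PySem.List.pyGetD (PySem.List.pyGetD dp (x - a) []) (y - c) 0)))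
        dp)
    dp

def solve_alt (b : Int) (w : Int) : Int :=
  let dpz := (PySem.List.pyRange 0 (b + 1) 1).map
    (fun _ => List.replicate (w + 1).toNat (0 : Int))
  let dp0 := dpz.set 0 ((PySem.List.pyGetD dpz 0 []).set 0 1)
  let dpF :=
    (PySem.List.pyRange b (-1) (-1)).foldl
      (fun dp a =>
        (PySem.List.pyRange w (-1) (-1)).foldl
          (fun dp c => if a = 0 ∧ c = 0 then dp else sweepB a c b w dp)
          dp)
      dp0
  PySem.List.pyGetD (PySem.List.pyGetD dpF b []) w 0

-- ===== PRECONDITION & SPEC =====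
-- A raises IndexError when b < 0 or w < 0 (groups[1] on an empty/short groups list);
-- Pre_solve excludes exactly those inputs (B raises IndexError there too).
def Pre_solve (b : Int) (w : Int) : Prop := 0 ≤ b ∧ 0 ≤ w
instance (b : Int) (w : Int) : Decidable (Pre_solve b w) := by unfold Pre_solve; infer_instance
def pvWitness_solve : Int × Int := (3, 2)

def Spec_solve (b : Int) (w : Int) (out : Int) : Prop := out = solve_alt b w
instance (b : Int) (w : Int) (out : Int) : Decidable (Spec_solve b w out) := by unfold Spec_solve; infer_instance

-- ===== CLAIM (what is proved, stated in full; the proofs are below) =====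
def Claim_equal_solve : Prop := ∀ (b : Int) (w : Int), Dom_solve b w → Pre_solve b w → Spec_solve b w (solve b w)

-- ===== LEMMAS AND PROOFS =====
-- Both sides are related to Ws L x y, the number of ways to write (x, y) as a
-- nonnegative integer combination of the coins in L (two-term guarded coin-change
-- recursion W with fuel, stabilized as Ws).
def W : Nat → List (Int × Int) → Int → Int → Int
  | 0, _, _, _ => 0
  | _ + 1, [], x, y => if x = 0 ∧ y = 0 then 1 else 0
  | n + 1, (a, c) :: L, x, y =>
      W (n + 1) L x y +
        (if 0 ≤ a ∧ 0 ≤ c ∧ ¬(a = 0 ∧ c = 0) ∧ a ≤ x ∧ c ≤ y then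
            W n ((a, c) :: L) (x - a) (y - c)
          else 0)
  termination_by n L => (n, L.length)

def Ws (L : List (Int × Int)) (x y : Int) : Int := W (x.toNat + y.toNat + 1) L x y

def goodC (p : Int × Int) : Prop := 0 ≤ p.1 ∧ 0 ≤ p.2 ∧ ¬(p.1 = 0 ∧ p.2 = 0)

theorem Ws_nil (x y : Int) : Ws [] x y = if x = 0 ∧ y = 0 then 1 else 0 := by
  simp [Ws, W]

theorem W_neg : ∀ (n : Nat) (L : List (Int × Int)) (x y : Int), x < 0 ∨ y < 0 → W n L x y = 0 := by
  intro n L x y h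
  induction n, L, x, y using W.induct with
  | case1 => simp [W]
  | case2 n x y hxy => omega
  | case3 n x y hxy => rw [W, if_neg hxy]
  | case4 n a c L x y ih2 ih1 =>
      rw [W, ih2 h]
      split_ifs with hgr
      · rw [ih1 (by omega)]; ring
      · ring

theorem W_stable : ∀ (n : Nat) (L : List (Int × Int)) (x y : Int),
    x.toNat + y.toNat < n → W n L x y = Ws L x y := by
  have key : ∀ (n : Nat) (L : List (Int × Int)) (x y : Int), ∀ m : Nat,
      x.toNat + y.toNat < n → x.toNat + y.toNat < m → W n L x y = W m L x y := by
    intro n L x y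
    induction n, L, x, y using W.induct with
    | case1 => intro m h _; omega
    | case2 n x y hxy =>
        intro m h1 h2
        obtain ⟨m', rfl⟩ : ∃ m', m = m' + 1 := ⟨m - 1, by omega⟩
        rw [W, W]
    | case3 n x y hxy =>
        intro m h1 h2
        obtain ⟨m', rfl⟩ : ∃ m', m = m' + 1 := ⟨m - 1, by omega⟩
        rw [W, W]
    | case4 n a c L x y ih2 ih1 =>
        intro m h1 h2
        obtain ⟨m', rfl⟩ : ∃ m', m = m' + 1 := ⟨m - 1, by omega⟩
        rw [W, W, ih2 (m' + 1) h1 h2]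
        split_ifs with hgr
        · rw [ih1 m' (by omega) (by omega)]
        · rfl
  intro n L x y h
  exact key n L x y _ h (by omega)

theorem Ws_neg (L : List (Int × Int)) (x y : Int) (h : x < 0 ∨ y < 0) : Ws L x y = 0 :=
  W_neg _ L x y h

theorem Ws_cons (a c : Int) (L : List (Int × Int)) (hg : goodC (a, c)) (x y : Int) :
    Ws ((a, c) :: L) x y = Ws L x y + Ws ((a, c) :: L) (x - a) (y - c) := by
  obtain ⟨ha, hc, hne⟩ := hg
  simp only at ha hc hne
  by_cases hxy : x < 0 ∨ y < 0
  · rw [Ws_neg _ _ _ hxy, Ws_neg _ _ _ hxy, Ws_neg _ _ _ (by omega)]; ring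
  · push Not at hxy
    show W (x.toNat + y.toNat + 1) _ x y = _
    rw [W, W_stable _ L x y (by omega)]
    split_ifs with hgr
    · rw [W_stable _ _ _ _ (by omega)]
    · rw [Ws_neg ((a, c) :: L) (x - a) (y - c) (by omega)]

theorem Ws_zero (L : List (Int × Int)) (hL : ∀ p ∈ L, goodC p) : Ws L 0 0 = 1 := by
  induction L with
  | nil => rw [Ws_nil]; simp
  | cons p L ih =>
      obtain ⟨a, c⟩ := p
      have hg := hL _ List.mem_cons_self
      rw [Ws_cons a c L hg, ih (fun q hq => hL q (List.mem_cons_of_mem _ hq)),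
        Ws_neg _ _ _ (by obtain ⟨h1, h2, h3⟩ := hg; simp at h1 h2 h3 ⊢; omega)]
      ring

theorem groupsA_cons (b w : Int) (hb : 0 ≤ b) (hw : 0 ≤ w) :
    groupsA b w = ((0 : Int), (0 : Int)) ::
      ((PySem.List.pyRange 1 (w + 1) 1).map (fun y => ((0 : Int), y)) ++
        (PySem.List.pyRange 1 (b + 1) 1).flatMap
          (fun x => (PySem.List.pyRange 0 (w + 1) 1).map (fun y => (x, y)))) := by
  rw [groupsA,
    show PySem.List.pyRange 0 (b + 1) 1 = 0 :: PySem.List.pyRange 1 (b + 1) 1 by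
      rw [PySem.List.pyRange_one_cons (by omega)]; norm_num,
    List.flatMap_cons,
    show PySem.List.pyRange 0 (w + 1) 1 = 0 :: PySem.List.pyRange 1 (w + 1) 1 by
      rw [PySem.List.pyRange_one_cons (by omega)]; norm_num,
    List.map_cons]
  simp

theorem groupsA_drop1_good (b w : Int) (hb : 0 ≤ b) (hw : 0 ≤ w) :
    ∀ p ∈ (groupsA b w).drop 1, goodC p := by
  rw [groupsA_cons b w hb hw]
  intro p hp
  simp only [List.drop_one, List.tail_cons, List.mem_append, List.mem_flatMap,
    List.mem_map] at hp
  rcases hp with ⟨y, hy, rfl⟩ | ⟨x, hx, ⟨y, hy, rfl⟩⟩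
  · rw [PySem.List.mem_pyRange_one] at hy
    simp only [goodC]; omega
  · rw [PySem.List.mem_pyRange_one] at hx
    rw [PySem.List.mem_pyRange_one] at hy
    simp only [goodC]; omega

def InvA (G : List (Int × Int)) (memo : MemoA) : Prop :=
  ∀ (x y g v : Int), memo[(x, y, g)]? = some v → v = Ws (G.drop g.toNat) x y

theorem kloopM_eq (G : List (Int × Int)) (inner' : Int → Int → MemoA → Int × MemoA)
    (L : List (Int × Int)) (a c : Int) (hg : goodC (a, c))
    (hi : ∀ x' y' m, InvA G m →
      (inner' x' y' m).1 = Ws L x' y' ∧ InvA G (inner' x' y' m).2) :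
    ∀ (kf : Nat) (x y k acc : Int) (memo : MemoA),
      (0 ≤ x - k * a → 0 ≤ y - k * c → (x - k * a).toNat + (y - k * c).toNat < kf) →
      InvA G memo →
      (kloopM inner' x y a c kf k acc memo).1 = acc + Ws ((a, c) :: L) (x - k * a) (y - k * c) ∧
        InvA G (kloopM inner' x y a c kf k acc memo).2 := by
  obtain ⟨ha, hc, hne⟩ := hg
  simp only at ha hc hne
  intro kf
  induction kf with
  | zero =>
      intro x y k acc memo hf hm
      rw [kloopM, Ws_neg _ _ _ (by omega)]
      exact ⟨by ring, hm⟩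
  | succ kf ih =>
      intro x y k acc memo hf hm
      rw [kloopM]
      split_ifs with hbr
      · rw [Ws_neg _ _ _ (by omega)]
        exact ⟨by ring, hm⟩
      · push Not at hbr
        obtain ⟨hv, hm'⟩ := hi (x - k * a) (y - k * c) memo hm
        have e1 : x - (k + 1) * a = (x - k * a) - a := by ring
        have e2 : y - (k + 1) * c = (y - k * c) - c := by ring
        obtain ⟨hv2, hm2⟩ := ih x y (k + 1) (acc + (inner' (x - k * a) (y - k * c) memo).1)
          (inner' (x - k * a) (y - k * c) memo).2 (by rw [e1, e2]; omega) hm'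
        refine ⟨?_, hm2⟩
        rw [hv2, hv, e1, e2, Ws_cons a c L ⟨ha, hc, hne⟩ (x - k * a) (y - k * c)]
        ring

theorem memoPut_spec (G : List (Int × Int)) (m : Nat) (x y : Int) {memo : MemoA}
    (hmemo : InvA G memo) {r : Int × MemoA}
    (h : r.1 = Ws (G.drop m) x y ∧ InvA G r.2) :
    (memoPut (x, y, (m : Int)) r).1 = Ws (G.drop m) x y ∧
      InvA G (memoPut (x, y, (m : Int)) r).2 := by
  refine ⟨h.1, ?_⟩
  intro x' y' g' v' hv'
  rw [memoPut] at hv'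
  simp only at hv'
  rw [Std.HashMap.getElem?_insert] at hv'
  split_ifs at hv' with heq
  · have hkey : x = x' ∧ y = y' ∧ (m : Int) = g' := by
      simpa using heq
    obtain ⟨rfl, rfl, rfl⟩ := hkey
    cases hv'
    simpa using h.1
  · exact h.2 x' y' g' v' hv'

theorem innerM_eq (G : List (Int × Int)) (Hgood : ∀ p ∈ G.drop 1, goodC p) :
    ∀ (n : Nat) (x y g : Int) (memo : MemoA), 1 ≤ g → g.toNat ≤ G.length →
      G.length - g.toNat < n → InvA G memo →
      (innerM G n x y g memo).1 = Ws (G.drop g.toNat) x y ∧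
        InvA G (innerM G n x y g memo).2 := by
  intro n
  induction n with
  | zero => intro x y g memo _ _ h _; omega
  | succ n ih =>
      intro x y g memo hg1 hgl hn hm
      obtain ⟨m, rfl⟩ : ∃ m : Nat, g = (m : Int) := ⟨g.toNat, (Int.toNat_of_nonneg (by omega)).symm⟩
      simp only [Int.toNat_natCast] at hgl hn ⊢
      have hgood : ∀ p ∈ G.drop m, goodC p := by
        intro p hp
        apply Hgood
        have h1m : (1 : Nat) ≤ m := by omega
        have : G.drop m = List.drop (m - 1) (List.drop 1 G) := by
          rw [List.drop_drop]; congr 1; omega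
        rw [this] at hp
        exact List.drop_subset _ _ hp
      rw [innerM]
      rcases hmem : (memo[((x : Int), (y : Int), (m : Int))]? : Option Int) with _ | v
      · -- cache miss
        show (memoPut (x, y, (m : Int)) _).1 = _ ∧ InvA G (memoPut (x, y, (m : Int)) _).2
        apply memoPut_spec G m x y hm
        split_ifs with h1 h2
        · obtain ⟨rfl, rfl⟩ := h1
          exact ⟨(Ws_zero _ hgood).symm, hm⟩
        · refine ⟨?_, hm⟩
          rw [List.drop_eq_nil_of_le (by omega), Ws_nil, if_neg h1]
        · have hlt : m < G.length := by
            rcases Nat.lt_or_ge m G.length with h | h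
            · exact h
            · exact absurd (by omega : (m : Int) = (G.length : Int)) h2
          have hget : PySem.List.pyGet? G (m : Int) = some G[m] := by
            rw [PySem.List.pyGet?_natCast, List.getElem?_eq_getElem hlt]
          rw [hget]
          have hdrop : G.drop m = G[m] :: G.drop (m + 1) := List.drop_eq_getElem_cons hlt
          rcases hAC : G[m] with ⟨a, c⟩
          have hmemc : (a, c) ∈ G.drop m := by rw [hdrop, hAC]; exact List.mem_cons_self
          have hi : ∀ x' y' mm, InvA G mm →
              (innerM G n x' y' ((m : Int) + 1) mm).1 = Ws (G.drop (m + 1)) x' y' ∧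
                InvA G (innerM G n x' y' ((m : Int) + 1) mm).2 := by
            intro x' y' mm hmm
            have := ih x' y' ((m : Int) + 1) mm (by omega)
              (by simp only [show ((m : Int) + 1).toNat = m + 1 by omega]; omega)
              (by simp only [show ((m : Int) + 1).toNat = m + 1 by omega]; omega) hmm
            rwa [show ((m : Int) + 1).toNat = m + 1 by omega] at this
          have hk := kloopM_eq G _ (G.drop (m + 1)) a c (hgood _ hmemc) hi
            (x.toNat + y.toNat + 2) x y 0 0 memo
            (by simp only [zero_mul, sub_zero]; omega) hm
          show (kloopM (fun x' y' mm => innerM G n x' y' ((m : Int) + 1) mm) x y a c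
              (x.toNat + y.toNat + 2) 0 0 memo).1 = Ws (List.drop m G) x y ∧ _
          obtain ⟨hk1, hk2⟩ := hk
          refine ⟨?_, hk2⟩
          rw [hk1]
          simp only [zero_mul, sub_zero, zero_add]
          rw [hdrop, hAC]
      · -- cache hit
        exact ⟨by simpa using hm x y (m : Int) v hmem, hm⟩

theorem solve_eq_Ws (b w : Int) (hb : 0 ≤ b) (hw : 0 ≤ w) :
    solve b w = Ws ((groupsA b w).drop 1) b w := by
  have hlen : 1 ≤ (groupsA b w).length := by
    rw [groupsA_cons b w hb hw]; simp
  have hinv : InvA (groupsA b w) ∅ := by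
    intro x y g v hv
    simp at hv
  have := (innerM_eq (groupsA b w) (groupsA_drop1_good b w hb hw)
    ((groupsA b w).length + 1) b w 1 ∅ le_rfl (by simpa using hlen) (by simp) hinv).1
  simpa [solve] using this

-- ===== B port: list-of-lists table =====

def Rd (dp : List (List Int)) (i j : Int) : Int :=
  PySem.List.pyGetD (PySem.List.pyGetD dp i []) j 0

def Dims (b w : Int) (dp : List (List Int)) : Prop :=
  dp.length = (b + 1).toNat ∧ ∀ row ∈ dp, row.length = (w + 1).toNat

theorem upd_dims (b w x y : Int) (v : Int) (dp : List (List Int)) (hd : Dims b w dp)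
    (hx0 : 0 ≤ x) (hxb : x ≤ b) : Dims b w (dp.set x.toNat ((PySem.List.pyGetD dp x []).set y.toNat v)) := by
  obtain ⟨h1, h2⟩ := hd
  refine ⟨by simpa using h1, ?_⟩
  intro row hrow
  rcases List.mem_or_eq_of_mem_set hrow with h | h
  · exact h2 row h
  · subst h
    rw [List.length_set, PySem.List.pyGetD_eq_getElem _ [] hx0 (by omega)]
    exact h2 _ (List.getElem_mem _)

theorem Rd_upd (b w x y v : Int) (dp : List (List Int)) (hd : Dims b w dp)
    (hx0 : 0 ≤ x) (hxb : x ≤ b) (hy0 : 0 ≤ y) (hyw : y ≤ w) :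
    ∀ i j, 0 ≤ i → i ≤ b → 0 ≤ j → j ≤ w →
      Rd (dp.set x.toNat ((PySem.List.pyGetD dp x []).set y.toNat v)) i j
      = if i = x ∧ j = y then v else Rd dp i j := by
  intro i j hi0 hib hj0 hjw
  obtain ⟨hl, hr⟩ := hd
  have hixlt : i.toNat < dp.length := by omega
  have hrowlen : ∀ (k : Nat) (hk : k < dp.length), (dp[k]).length = (w + 1).toNat :=
    fun k hk => hr _ (List.getElem_mem _)
  have hxrow : PySem.List.pyGetD dp x [] = dp[x.toNat] :=
    PySem.List.pyGetD_eq_getElem _ [] hx0 (by omega)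
  rw [Rd, PySem.List.pyGetD_eq_getElem _ [] hi0 (by simp; omega), List.getElem_set]
  by_cases hix : i = x
  · rw [if_pos (by omega), hxrow,
      PySem.List.pyGetD_eq_getElem _ 0 hj0
        (by rw [List.length_set]; rw [hrowlen x.toNat (by omega)]; omega),
      List.getElem_set]
    by_cases hjy : j = y
    · rw [if_pos (by omega), if_pos ⟨hix, hjy⟩]
    · rw [if_neg (by omega), if_neg (by tauto), Rd,
        PySem.List.pyGetD_eq_getElem _ [] hi0 (by omega),
        PySem.List.pyGetD_eq_getElem _ 0 hj0 (by rw [hrowlen i.toNat hixlt]; omega)]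
      congr 2
      omega
  · rw [if_neg (by omega), if_neg (by tauto), Rd,
      PySem.List.pyGetD_eq_getElem _ [] hi0 (by omega),
      PySem.List.pyGetD_eq_getElem _ 0 hj0 (by rw [hrowlen i.toNat hixlt]; omega)]

theorem rowB (a c b w x : Int) (L : List (Int × Int)) (hg : goodC (a, c))
    (hax : a ≤ x) (hxb : x ≤ b) :
    ∀ (n : Nat) (y0 : Int) (dp : List (List Int)), (w + 1 - y0).toNat ≤ n → c ≤ y0 →
      Dims b w dp →
      (∀ i j, 0 ≤ i → i ≤ b → 0 ≤ j → j ≤ w →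
        Rd dp i j = if i < x ∨ (i = x ∧ j < y0) then Ws ((a, c) :: L) i j else Ws L i j) →
      Dims b w ((PySem.List.pyRange y0 (w + 1) 1).foldl
          (fun dp y =>
            dp.set x.toNat ((PySem.List.pyGetD dp x []).set y.toNat
              (PySem.List.pyGetD (PySem.List.pyGetD dp x []) y 0 +
                PySem.List.pyGetD (PySem.List.pyGetD dp (x - a) []) (y - c) 0))) dp) ∧
      (∀ i j, 0 ≤ i → i ≤ b → 0 ≤ j → j ≤ w →
        Rd ((PySem.List.pyRange y0 (w + 1) 1).foldl
          (fun dp y =>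
            dp.set x.toNat ((PySem.List.pyGetD dp x []).set y.toNat
              (PySem.List.pyGetD (PySem.List.pyGetD dp x []) y 0 +
                PySem.List.pyGetD (PySem.List.pyGetD dp (x - a) []) (y - c) 0))) dp) i j
        = if i ≤ x then Ws ((a, c) :: L) i j else Ws L i j) := by
  obtain ⟨ha, hc, hne⟩ := hg
  simp only at ha hc hne
  intro n
  induction n with
  | zero =>
      intro y0 dp hn hcy hd hinv
      rw [PySem.List.pyRange_one_eq_nil (by omega)]
      exact ⟨hd, fun i j hi0 hib hj0 hjw =>
        (hinv i j hi0 hib hj0 hjw).trans (if_congr (by omega) rfl rfl)⟩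
  | succ n ih =>
      intro y0 dp hn hcy hd hinv
      by_cases hy0 : w + 1 ≤ y0
      · rw [PySem.List.pyRange_one_eq_nil hy0]
        exact ⟨hd, fun i j hi0 hib hj0 hjw =>
          (hinv i j hi0 hib hj0 hjw).trans (if_congr (by omega) rfl rfl)⟩
      · rw [PySem.List.pyRange_one_cons (by omega), List.foldl_cons]
        apply ih (y0 + 1) _ (by omega) (by omega)
          (upd_dims b w x y0 _ dp hd (by omega) hxb)
        intro i j hi0 hib hj0 hjw
        rw [Rd_upd b w x y0 _ dp hd (by omega) hxb (by omega) (by omega) i j hi0 hib hj0 hjw]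
        by_cases hij : i = x ∧ j = y0
        · obtain ⟨rfl, rfl⟩ := hij
          rw [if_pos ⟨rfl, rfl⟩]
          show Rd dp i j + Rd dp (i - a) (j - c) = _
          rw [hinv i j hi0 hib hj0 hjw, if_neg (by omega),
            hinv (i - a) (j - c) (by omega) (by omega) (by omega) (by omega),
            if_pos (by omega), if_pos (by omega)]
          exact (Ws_cons a c L ⟨ha, hc, hne⟩ i j).symm
        · rw [if_neg hij, hinv i j hi0 hib hj0 hjw]
          exact if_congr (by omega) rfl rfl

theorem colB (a c b w : Int) (L : List (Int × Int)) (hg : goodC (a, c)) :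
    ∀ (n : Nat) (x0 : Int) (dp : List (List Int)), a ≤ x0 → (b + 1 - x0).toNat ≤ n →
      Dims b w dp →
      (∀ i j, 0 ≤ i → i ≤ b → 0 ≤ j → j ≤ w →
        Rd dp i j = if i < x0 then Ws ((a, c) :: L) i j else Ws L i j) →
      Dims b w ((PySem.List.pyRange x0 (b + 1) 1).foldl
          (fun dp x =>
            (PySem.List.pyRange c (w + 1) 1).foldl
              (fun dp y =>
                dp.set x.toNat ((PySem.List.pyGetD dp x []).set y.toNat
                  (PySem.List.pyGetD (PySem.List.pyGetD dp x []) y 0 +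
                    PySem.List.pyGetD (PySem.List.pyGetD dp (x - a) []) (y - c) 0))) dp) dp) ∧
      (∀ i j, 0 ≤ i → i ≤ b → 0 ≤ j → j ≤ w →
        Rd ((PySem.List.pyRange x0 (b + 1) 1).foldl
          (fun dp x =>
            (PySem.List.pyRange c (w + 1) 1).foldl
              (fun dp y =>
                dp.set x.toNat ((PySem.List.pyGetD dp x []).set y.toNat
                  (PySem.List.pyGetD (PySem.List.pyGetD dp x []) y 0 +
                    PySem.List.pyGetD (PySem.List.pyGetD dp (x - a) []) (y - c) 0))) dp) dp) i j
        = Ws ((a, c) :: L) i j) := by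
  intro n
  induction n with
  | zero =>
      intro x0 dp hax hn hd hinv
      rw [PySem.List.pyRange_one_eq_nil (show b + 1 ≤ x0 by omega), List.foldl_nil]
      exact ⟨hd, fun i j hi0 hib hj0 hjw => by
        rw [hinv i j hi0 hib hj0 hjw, if_pos (by omega)]⟩
  | succ n ih =>
      intro x0 dp hax hn hd hinv
      by_cases hx0 : b + 1 ≤ x0
      · rw [PySem.List.pyRange_one_eq_nil hx0, List.foldl_nil]
        exact ⟨hd, fun i j hi0 hib hj0 hjw => by
          rw [hinv i j hi0 hib hj0 hjw, if_pos (by omega)]⟩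
      · rw [PySem.List.pyRange_one_cons (show x0 < b + 1 by omega), List.foldl_cons]
        have hrow := rowB a c b w x0 L hg hax (by omega) (w + 1 - c).toNat c dp le_rfl le_rfl hd ?_
        · apply ih (x0 + 1) _ (by omega) (by omega) hrow.1
          intro i j hi0 hib hj0 hjw
          rw [hrow.2 i j hi0 hib hj0 hjw]
          exact if_congr (by omega) rfl rfl
        · intro i j hi0 hib hj0 hjw
          rw [hinv i j hi0 hib hj0 hjw]
          by_cases hcnd : i < x0
          · rw [if_pos hcnd, if_pos (Or.inl hcnd)]
          · rw [if_neg hcnd]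
            by_cases hcnd2 : i = x0 ∧ j < c
            · rw [if_pos (Or.inr hcnd2),
                Ws_cons a c L hg i j,
                Ws_neg ((a, c) :: L) (i - a) (j - c) (by omega)]
              ring
            · rw [if_neg (by tauto)]

theorem sweepB_eq (a c b w : Int) (L : List (Int × Int)) (hg : goodC (a, c))
    (dp : List (List Int)) (hd : Dims b w dp)
    (h : ∀ i j, 0 ≤ i → i ≤ b → 0 ≤ j → j ≤ w → Rd dp i j = Ws L i j) :
    Dims b w (sweepB a c b w dp) ∧
      (∀ i j, 0 ≤ i → i ≤ b → 0 ≤ j → j ≤ w →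
        Rd (sweepB a c b w dp) i j = Ws ((a, c) :: L) i j) := by
  rw [sweepB]
  apply colB a c b w L hg (b + 1 - a).toNat a dp le_rfl le_rfl hd
  intro i j hi0 hib hj0 hjw
  rw [h i j hi0 hib hj0 hjw]
  by_cases hcnd : i < a
  · rw [if_pos hcnd, Ws_cons a c L hg i j,
      Ws_neg ((a, c) :: L) (i - a) (j - c)
        (by obtain ⟨h1, h2, h3⟩ := hg; simp only at h1 h2 h3; omega)]
    ring
  · rw [if_neg hcnd]

theorem foldl_prod {σ α β : Type} (as : List α) (cs : List β) (f : σ → α → β → σ) (s : σ) :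
    as.foldl (fun s a => cs.foldl (fun s c => f s a c) s) s
    = (as.flatMap (fun a => cs.map (fun c => (a, c)))).foldl (fun s p => f s p.1 p.2) s := by
  induction as generalizing s with
  | nil => rfl
  | cons a as ih => simp [List.flatMap_cons, List.foldl_append, List.foldl_map, ih]

theorem foldl_skip {σ : Type} (Q : List (Int × Int))
    (f : σ → Int → Int → σ) (s : σ) :
    Q.foldl (fun s p => if p.1 = 0 ∧ p.2 = 0 then s else f s p.1 p.2) s
    = (Q.filter (fun p => decide ¬(p.1 = 0 ∧ p.2 = 0))).foldl (fun s p => f s p.1 p.2) s := by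
  induction Q generalizing s with
  | nil => rfl
  | cons p Q ih =>
      rw [List.foldl_cons, List.filter_cons]
      by_cases h : p.1 = 0 ∧ p.2 = 0
      · rw [if_pos h, if_neg (by simp [h])]
        exact ih s
      · rw [if_neg h, if_pos (by simp only [decide_eq_true_eq]; exact h), List.foldl_cons]
        exact ih _

theorem prodRev (b w : Int) (hb : 0 ≤ b) (hw : 0 ≤ w) :
    (PySem.List.pyRange b (-1) (-1)).flatMap
      (fun a => (PySem.List.pyRange w (-1) (-1)).map (fun c => (a, c)))
    = (groupsA b w).reverse := by
  rw [groupsA, PySem.List.pyRange_neg_one_eq_reverse b (-1),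
    PySem.List.pyRange_neg_one_eq_reverse w (-1)]
  norm_num
  rw [List.reverse_flatMap]
  simp [Function.comp_def]

theorem filter_groups (b w : Int) (hb : 0 ≤ b) (hw : 0 ≤ w) :
    (groupsA b w).filter (fun p => decide ¬(p.1 = 0 ∧ p.2 = 0)) = (groupsA b w).drop 1 := by
  have hc := groupsA_cons b w hb hw
  rw [hc, List.filter_cons, if_neg (by simp), List.drop_one, List.tail_cons,
    List.filter_eq_self]
  intro p hp
  have hmem : p ∈ (groupsA b w).drop 1 := by
    rw [hc, List.drop_one, List.tail_cons]; exact hp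
  obtain ⟨h1, h2, h3⟩ := groupsA_drop1_good b w hb hw p hmem
  simp only [decide_eq_true_eq]
  exact h3

theorem foldCoins (b w : Int) :
    ∀ (Q : List (Int × Int)) (dp : List (List Int)) (L : List (Int × Int)),
      (∀ p ∈ Q, goodC p) → Dims b w dp →
      (∀ i j, 0 ≤ i → i ≤ b → 0 ≤ j → j ≤ w → Rd dp i j = Ws L i j) →
      Dims b w (Q.foldl (fun dp p => sweepB p.1 p.2 b w dp) dp) ∧
        (∀ i j, 0 ≤ i → i ≤ b → 0 ≤ j → j ≤ w →
          Rd (Q.foldl (fun dp p => sweepB p.1 p.2 b w dp) dp) i j = Ws (Q.reverse ++ L) i j) := by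
  intro Q
  induction Q with
  | nil => intro dp L _ hd h; exact ⟨hd, by simpa using h⟩
  | cons p Q ih =>
      intro dp L hgood hd h
      obtain ⟨a, c⟩ := p
      obtain ⟨hd1, h1⟩ := sweepB_eq a c b w L (hgood _ List.mem_cons_self) dp hd h
      obtain ⟨hd2, h2⟩ := ih _ ((a, c) :: L) (fun q hq => hgood q (List.mem_cons_of_mem _ hq)) hd1 h1
      exact ⟨hd2, by simpa using h2⟩

theorem dpz_spec (b w : Int) (hb : 0 ≤ b) (hw : 0 ≤ w) :
    Dims b w ((PySem.List.pyRange 0 (b + 1) 1).map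
      (fun _ => List.replicate (w + 1).toNat (0 : Int))) ∧
    ∀ i j, 0 ≤ i → i ≤ b → 0 ≤ j → j ≤ w →
      Rd ((PySem.List.pyRange 0 (b + 1) 1).map
        (fun _ => List.replicate (w + 1).toNat (0 : Int))) i j = 0 := by
  have hlen : ((PySem.List.pyRange 0 (b + 1) 1).map
      (fun _ => List.replicate (w + 1).toNat (0 : Int))).length = (b + 1).toNat := by
    rw [List.length_map, PySem.List.length_pyRange_one]
    omega
  refine ⟨⟨hlen, ?_⟩, ?_⟩
  · intro row hrow
    rcases List.mem_map.mp hrow with ⟨_, _, rfl⟩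
    exact List.length_replicate
  · intro i j hi0 hib hj0 hjw
    rw [Rd, PySem.List.pyGetD_eq_getElem _ [] hi0 (by omega), List.getElem_map,
      PySem.List.pyGetD_eq_getElem _ 0 hj0 (by simp [List.length_replicate]; omega),
      List.getElem_replicate]

theorem solveAlt_eq_Ws (b w : Int) (hb : 0 ≤ b) (hw : 0 ≤ w) :
    solve_alt b w = Ws ((groupsA b w).drop 1) b w := by
  obtain ⟨hdz, hvz⟩ := dpz_spec b w hb hw
  set dpz := (PySem.List.pyRange 0 (b + 1) 1).map
    (fun _ => List.replicate (w + 1).toNat (0 : Int)) with hdpz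
  have h0eq : dpz.set 0 ((PySem.List.pyGetD dpz 0 []).set 0 1)
      = dpz.set (0 : Int).toNat ((PySem.List.pyGetD dpz 0 []).set (0 : Int).toNat 1) := by
    norm_num
  have hd0 : Dims b w (dpz.set 0 ((PySem.List.pyGetD dpz 0 []).set 0 1)) := by
    rw [h0eq]
    exact upd_dims b w 0 0 1 dpz hdz le_rfl hb
  have hv0 : ∀ i j, 0 ≤ i → i ≤ b → 0 ≤ j → j ≤ w →
      Rd (dpz.set 0 ((PySem.List.pyGetD dpz 0 []).set 0 1)) i j = Ws [] i j := by
    intro i j hi0 hib hj0 hjw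
    rw [h0eq, Rd_upd b w 0 0 1 dpz hdz le_rfl hb le_rfl hw i j hi0 hib hj0 hjw, Ws_nil]
    split_ifs with h1
    · rfl
    · exact hvz i j hi0 hib hj0 hjw
  rw [solve_alt]
  show PySem.List.pyGetD (PySem.List.pyGetD
      ((PySem.List.pyRange b (-1) (-1)).foldl
        (fun dp a =>
          (PySem.List.pyRange w (-1) (-1)).foldl
            (fun dp c => if a = 0 ∧ c = 0 then dp else sweepB a c b w dp) dp)
        (dpz.set 0 ((PySem.List.pyGetD dpz 0 []).set 0 1))) b []) w 0 = _
  rw [foldl_prod (f := fun dp a c => if a = 0 ∧ c = 0 then dp else sweepB a c b w dp),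
    foldl_skip (f := fun dp a c => sweepB a c b w dp), prodRev b w hb hw,
    List.filter_reverse, filter_groups b w hb hw]
  have hgood : ∀ p ∈ ((groupsA b w).drop 1).reverse, goodC p := by
    intro p hp
    exact groupsA_drop1_good b w hb hw p (List.mem_reverse.mp hp)
  obtain ⟨hdF, hvF⟩ := foldCoins b w (((groupsA b w).drop 1).reverse) _ [] hgood hd0 hv0
  have := hvF b w hb le_rfl hw le_rfl
  rw [List.reverse_reverse] at this
  simpa [Rd] using this

-- ===== VERDICT (by name: the statement is the Claim_ definition above) =====
theorem solve_spec : Claim_equal_solve := by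
  intro b w _ hpre
  unfold Spec_solve
  rw [solve_eq_Ws b w hpre.1 hpre.2, solveAlt_eq_Ws b w hpre.1 hpre.2]
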